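-- pv_equiv track=rewrite | github.com/unhhyyeexx/TIL | PS/BOJ/1475 방번호.py | solution
-- ===== SOURCE A (Python) =====
-- def solution(array):
--     nums = {'6':0}
--     for n in array:
--         if n in ['6', '9']:
--             nums['6'] += 1
--         elif n in nums:
--             nums[n] += 1
--         else:
--             nums[n] = 1
--
--     if nums['6'] % 2 :
--         nums['6'] = nums['6']//2 + 1
--     else:
--         nums['6'] = nums['6']//2
--
--     answer = max(nums.values())
--     return answer
-- ===== SOURCE B (Python) =====
-- def solution(array):
--     s = sorted('6' if c == '9' else c for c in array)
--     prev = None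
--     run = 0
--     best = 0
--     for c in s:
--         run = run + 1 if c == prev else 1
--         prev = c
--         need = (run + 1) // 2 if c == '6' else run
--         best = max(best, need)
--     return best
-- ===== Notes on version B (the rewrite author's own statement) =====
-- stated objective: alternative
-- what changed: Replaces A's single branching pass that maintains a mutable frequency dict by a sort-then-scan algorithm: map 9 to 6, sort the characters so equal digits are adjacent, and take the maximum over run lengths in one linear sweep (with ceil-halving applied to the 6-run), so no dictionary or per-key counting exists at all.
import Mathlib
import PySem

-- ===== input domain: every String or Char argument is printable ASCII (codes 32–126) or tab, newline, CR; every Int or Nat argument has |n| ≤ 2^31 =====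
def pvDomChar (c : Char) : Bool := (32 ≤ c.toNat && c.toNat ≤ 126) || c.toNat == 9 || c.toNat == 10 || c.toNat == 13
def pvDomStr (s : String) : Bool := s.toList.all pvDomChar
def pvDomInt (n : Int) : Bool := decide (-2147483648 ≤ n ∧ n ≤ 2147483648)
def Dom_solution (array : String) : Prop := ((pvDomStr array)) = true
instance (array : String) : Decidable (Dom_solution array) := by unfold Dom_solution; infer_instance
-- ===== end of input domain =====

-- B replaces A's branching single pass over a mutable dict by sort-then-scan over runs:
-- map 9→6, sort, one sweep maximising run lengths (ceil-halved for the '6' run). Objective: alternative algorithm, same answer.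

-- ===== PORT A =====
-- loop body of A's 'for n in array' (helper for the fold; same branches, same order)
def pvStep (d : PySem.Dict Char Int) (n : Char) : PySem.Dict Char Int :=
  if n = '6' ∨ n = '9' then d.insert '6' (d.getD '6' 0 + 1)        -- nums['6'] += 1
  else if d.contains n then d.insert n (d.getD n 0 + 1)            -- nums[n] += 1 (key present)
  else d.insert n 1                                                -- nums[n] = 1

def solution (array : String) : Int :=
  let nums := array.toList.foldl pvStep (PySem.Dict.ofList [('6', 0)])
  let nums := if PySem.Int.mod (nums.getD '6' 0) 2 ≠ 0             -- if nums['6'] % 2 :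
              then nums.insert '6' (PySem.Int.floordiv (nums.getD '6' 0) 2 + 1)
              else nums.insert '6' (PySem.Int.floordiv (nums.getD '6' 0) 2)
  -- max(nums.values()): values is never empty ('6' is always a key), so the default 0 is never used
  (PySem.List.max? nums.values (fun v => v)).getD 0

-- ===== PORT B =====
-- loop body of B's 'for c in s' over the sorted list; state = (prev, run, best)
def pvBStep (st : Option Char × Int × Int) (c : Char) : Option Char × Int × Int :=
  let run := if some c = st.1 then st.2.1 + 1 else 1               -- run = run + 1 if c == prev else 1
  let need := if c = '6' then PySem.Int.floordiv (run + 1) 2 else run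
  (some c, run, max st.2.2 need)                                   -- prev = c; best = max(best, need)

def solution_alt (array : String) : Int :=
  let s := PySem.List.sorted (array.toList.map (fun c => if c == '9' then '6' else c)) (fun c => c) false
  (s.foldl pvBStep (none, 0, 0)).2.2

-- ===== PRECONDITION & SPEC =====
def Spec_solution (array : String) (out : Int) : Prop := out = solution_alt array
instance (array : String) (out : Int) : Decidable (Spec_solution array out) := by unfold Spec_solution; infer_instance

-- ===== CLAIM =====
def Claim_equal_solution : Prop := ∀ (array : String), Dom_solution array → Spec_solution array (solution array)

-- ===== LEMMAS AND PROOFS =====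

-- the filter shared by the invariant and both characterisations: characters other than '6' and '9'
def pvOther (c : Char) : Bool := !(c == '6' || c == '9')

-- the run-length adjustment B applies: ceil-halve a '6' run, keep any other run
def pvAdj (c : Char) (r : Int) : Int := if c = '6' then PySem.Int.floordiv (r + 1) 2 else r

-- the common value both sides compute: max over the distinct chars of s of the adjusted count
def pvM (s : List Char) : Int :=
  ((PySem.List.dedup s).map (fun c => pvAdj c (s.count c))).foldl max 0

lemma pv_dedup_app (l : List Char) (x : Char) :
    PySem.List.dedup (l ++ [x]) = if x ∈ l then PySem.List.dedup l else PySem.List.dedup l ++ [x] := by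
  simp only [PySem.List.dedup_eq_ofList, PySem.Set.ofList_eq_foldl, List.foldl_append,
    List.foldl_cons, List.foldl_nil, PySem.Set.add]
  simp only [← PySem.Set.ofList_eq_foldl, PySem.Set.contains, List.contains_iff_mem, PySem.Set.mem_ofList]

lemma pvF1 (l : List Char) (c : Char) (h : c ∈ (PySem.List.dedup l).filter pvOther) :
    c ≠ '6' ∧ c ≠ '9' ∧ c ∈ l := by
  simp only [List.mem_filter, PySem.List.mem_dedup, pvOther, Bool.not_eq_eq_eq_not, Bool.not_true,
    Bool.or_eq_false_iff, beq_eq_false_iff_ne] at h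
  exact ⟨h.2.1, h.2.2, h.1⟩

-- first-match lookup in a key-to-value table built by map is the function value
lemma pv_get?_mk_map (cs : List Char) (g : Char → Int) (x : Char) (hx : x ∈ cs) :
    (PySem.Dict.mk (cs.map (fun c => (c, g c)))).get? x = some (g x) := by
  induction cs with
  | nil => cases hx
  | cons c t ih =>
      rw [List.map_cons, PySem.Dict.get?_mk_cons]
      by_cases h : c = x
      · simp [h]
      · have : x ∈ t := by cases hx with | head => exact absurd rfl h | tail _ h' => exact h'
        simp [h, ih this]

-- the dict A's loop has built after reading l, in closed form
lemma pv_loop_eq (l : List Char) :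
    l.foldl pvStep (PySem.Dict.ofList [('6', 0)]) =
    PySem.Dict.mk (('6', ((l.count '6' + l.count '9' : Nat) : Int)) ::
      ((PySem.List.dedup l).filter pvOther).map (fun c => (c, (l.count c : Int)))) := by
  induction l using List.reverseRecOn with
  | nil => rfl
  | append_singleton l x ih =>
      rw [List.foldl_append, List.foldl_cons, List.foldl_nil, ih]
      unfold pvStep
      by_cases h69 : x = '6' ∨ x = '9'
      · rw [if_pos h69]
        have hpv : pvOther x = false := by rcases h69 with rfl | rfl <;> rfl
        have hfilt : (PySem.List.dedup (l ++ [x])).filter pvOther = (PySem.List.dedup l).filter pvOther := by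
          rw [pv_dedup_app]; split_ifs with h
          · rfl
          · rw [List.filter_append]; simp [hpv]
        have hgetD : (PySem.Dict.mk (('6', ((l.count '6' + l.count '9' : Nat) : Int)) ::
            ((PySem.List.dedup l).filter pvOther).map (fun c => (c, (l.count c : Int))))).getD '6' 0
            = ((l.count '6' + l.count '9' : Nat) : Int) := by
          simp [PySem.Dict.getD_eq_get?_getD, PySem.Dict.get?_mk_cons]
        have hcont : (PySem.Dict.mk (('6', ((l.count '6' + l.count '9' : Nat) : Int)) ::
            ((PySem.List.dedup l).filter pvOther).map (fun c => (c, (l.count c : Int))))).contains '6' = true := by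
          simp [PySem.Dict.contains_mk]
        apply PySem.Dict.ext
        rw [hgetD, PySem.Dict.items_insert_of_contains _ _ hcont, hfilt]
        rw [List.map_cons]
        refine congrArg₂ _ ?_ ?_
        · simp only [beq_self_eq_true, if_pos]
          rcases h69 with rfl | rfl <;> simp [List.count_append] <;> ring
        · rw [List.map_map]
          refine List.map_congr_left (fun c hc => ?_)
          obtain ⟨h6, h9, hl⟩ := pvF1 l c hc
          have hcx : c ≠ x := by rcases h69 with rfl | rfl <;> assumption
          simp [Function.comp, h6, List.count_append]
          simp [List.count_eq_zero, hcx]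
      · rw [if_neg h69]
        obtain ⟨h6, h9⟩ : x ≠ '6' ∧ x ≠ '9' := by constructor <;> (intro h; exact h69 (by simp [h]))
        have hpv : pvOther x = true := by simp [pvOther, h6, h9]
        by_cases hmem : x ∈ l
        · -- x already a key: nums[n] += 1
          have hfd : x ∈ (PySem.List.dedup l).filter pvOther := by
            simp [List.mem_filter, hmem, hpv]
          have hfilt : (PySem.List.dedup (l ++ [x])).filter pvOther = (PySem.List.dedup l).filter pvOther := by
            rw [pv_dedup_app, if_pos hmem]
          have h6x : ('6' == x) = false := by simp [Ne.symm h6]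
          have hgetD : (PySem.Dict.mk (('6', ((l.count '6' + l.count '9' : Nat) : Int)) ::
              ((PySem.List.dedup l).filter pvOther).map (fun c => (c, (l.count c : Int))))).getD x 0
              = ((l.count x : Nat) : Int) := by
            rw [PySem.Dict.getD_eq_get?_getD, PySem.Dict.get?_mk_cons, h6x]
            simpa using congrArg (Option.getD · 0)
              (pv_get?_mk_map ((PySem.List.dedup l).filter pvOther) (fun c => ((l.count c : Nat) : Int)) x hfd)
          have hcont : (PySem.Dict.mk (('6', ((l.count '6' + l.count '9' : Nat) : Int)) ::
              ((PySem.List.dedup l).filter pvOther).map (fun c => (c, (l.count c : Int))))).contains x = true := by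
            rw [PySem.Dict.contains_eq_isSome_get?, PySem.Dict.get?_mk_cons, h6x]
            simp only [if_false, Bool.false_eq_true]
            rw [pv_get?_mk_map ((PySem.List.dedup l).filter pvOther) (fun c => ((l.count c : Nat) : Int)) x hfd]
            rfl
          rw [if_pos hcont]
          apply PySem.Dict.ext
          rw [hgetD, PySem.Dict.items_insert_of_contains _ _ hcont, hfilt]
          rw [List.map_cons]
          refine congrArg₂ _ ?_ ?_
          · have : ('6' == x) = false := by simp [Ne.symm h6]
            simp [this, List.count_append, h6, h9]
          · rw [List.map_map]
            refine List.map_congr_left (fun c hc => ?_)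
            by_cases hcx : c = x
            · subst hcx
              simp [Function.comp, List.count_append]
            · simp [Function.comp, hcx, List.count_append]
              simp [List.count_eq_zero, hcx]
        · -- fresh key: nums[n] = 1
          have hfilt : (PySem.List.dedup (l ++ [x])).filter pvOther
              = (PySem.List.dedup l).filter pvOther ++ [x] := by
            rw [pv_dedup_app, if_neg hmem, List.filter_append]; simp [hpv]
          have hcont : (PySem.Dict.mk (('6', ((l.count '6' + l.count '9' : Nat) : Int)) ::
              ((PySem.List.dedup l).filter pvOther).map (fun c => (c, (l.count c : Int))))).contains x = false := by
            rw [PySem.Dict.contains_eq_decide_mem_keys]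
            simp only [PySem.Dict.keys, List.map_cons, List.map_map, decide_eq_false_iff_not, List.mem_cons]
            rintro (h | h)
            · exact h6 h
            · simp only [List.mem_map, Function.comp] at h
              obtain ⟨c, hc, hcx⟩ := h
              exact hmem (hcx ▸ (pvF1 l c hc).2.2)
          have hcont' : ¬ ((PySem.Dict.mk (('6', ((l.count '6' + l.count '9' : Nat) : Int)) ::
              ((PySem.List.dedup l).filter pvOther).map (fun c => (c, (l.count c : Int))))).contains x = true) := by
            rw [hcont]; exact Bool.false_ne_true
          rw [if_neg hcont']
          apply PySem.Dict.ext
          rw [PySem.Dict.items_insert_of_not_contains _ _ hcont, hfilt]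
          simp only [List.map_append, List.map_cons, List.map_nil, List.cons_append]
          refine congrArg₂ (· :: ·) ?_ ?_
          · have c6 : List.count '6' [x] = 0 := by rw [List.count_eq_zero]; simp [Ne.symm h6]
            have c9 : List.count '9' [x] = 0 := by rw [List.count_eq_zero]; simp [Ne.symm h9]
            simp [List.count_append, c6, c9]
          · refine congrArg₂ (· ++ ·) ?_ ?_
            · refine List.map_congr_left (fun c hc => ?_)
              have hcx : c ≠ x := fun h => hmem (h ▸ (pvF1 l c hc).2.2)
              simp [List.count_append]
              simp [List.count_eq_zero, hcx]
            · have : List.count x l = 0 := List.count_eq_zero.mpr hmem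
              simp [List.count_append, this]

lemma pv_foldl_max_comm (t : List Int) (a b : Int) :
    t.foldl max (max a b) = max a (t.foldl max b) := by
  induction t generalizing b with
  | nil => rfl
  | cons c t ih => rw [List.foldl_cons, List.foldl_cons, max_assoc, ih]

-- running max started at a nonnegative v is max(v, max(vals, default=0))
lemma pv_max_split (vals : List Int) (v : Int) (hv : 0 ≤ v) :
    vals.foldl max v = max v ((PySem.List.max? vals (fun y => y)).getD 0) := by
  cases vals with
  | nil => simp [max_eq_left hv, PySem.List.max?]
  | cons y t =>
      rw [PySem.List.max?_id_cons, Option.getD_some, List.foldl_cons, ← pv_foldl_max_comm]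

-- values of A's final dict, and the max split into head and tail
lemma pv_final (l : List Char) (s w : Int) (hw0 : 0 ≤ w) :
    (PySem.List.max?
        ((PySem.Dict.mk (('6', s) ::
            ((PySem.List.dedup l).filter pvOther).map (fun c => (c, (l.count c : Int))))).insert '6' w).values
        (fun v => v)).getD 0
    = max w ((PySem.List.max?
        (((PySem.List.dedup l).filter pvOther).map (fun c => (l.count c : Int))) (fun v => v)).getD 0) := by
  have hcont : (PySem.Dict.mk (('6', s) ::
      ((PySem.List.dedup l).filter pvOther).map (fun c => (c, (l.count c : Int))))).contains '6' = true := by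
    simp [PySem.Dict.contains_mk]
  have hitems : ((PySem.Dict.mk (('6', s) ::
      ((PySem.List.dedup l).filter pvOther).map (fun c => (c, (l.count c : Int))))).insert '6' w).items
      = ('6', w) :: ((PySem.List.dedup l).filter pvOther).map (fun c => (c, (l.count c : Int))) := by
    rw [PySem.Dict.items_insert_of_contains _ _ hcont]
    rw [List.map_cons]
    refine congrArg₂ _ (by simp) ?_
    rw [List.map_map]
    refine List.map_congr_left (fun c hc => ?_)
    obtain ⟨h6, _, _⟩ := pvF1 l c hc
    simp [Function.comp, h6]
  have hvals : ((PySem.Dict.mk (('6', s) ::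
      ((PySem.List.dedup l).filter pvOther).map (fun c => (c, (l.count c : Int))))).insert '6' w).values
      = w :: ((PySem.List.dedup l).filter pvOther).map (fun c => (l.count c : Int)) := by
    simp only [PySem.Dict.values, hitems, List.map_cons, List.map_map]
    rfl
  rw [hvals, PySem.List.max?_id_cons, Option.getD_some]
  exact pv_max_split _ w hw0

-- ===== B-side lemmas =====

lemma pvAdj_mono (c : Char) {r r' : Int} (h : r ≤ r') : pvAdj c r ≤ pvAdj c r' := by
  unfold pvAdj
  split_ifs
  · rw [PySem.Int.floordiv_eq_ediv_of_pos (by norm_num), PySem.Int.floordiv_eq_ediv_of_pos (by norm_num)]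
    omega
  · exact h

-- bump one entry of a max-fold: entries agree except at x ∈ D where the new one is larger
lemma pv_bump (D : List Char) (g g' : Char → Int) (x : Char) (hx : x ∈ D)
    (hle : g x ≤ g' x) (hag : ∀ c ∈ D, c ≠ x → g' c = g c) (b : Int) :
    (D.map g').foldl max b = max ((D.map g).foldl max b) (g' x) := by
  induction D generalizing b with
  | nil => cases hx
  | cons d t ih =>
      by_cases hxt : x ∈ t
      · have hag' : ∀ c ∈ t, c ≠ x → g' c = g c := fun c hc => hag c (List.mem_cons_of_mem d hc)
        by_cases hdx : d = x
        · subst hdx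
          rw [List.map_cons, List.map_cons, List.foldl_cons, List.foldl_cons, ih hxt hag']
          rw [max_comm b (g' d), pv_foldl_max_comm, max_comm b (g d), pv_foldl_max_comm]
          omega
        · rw [List.map_cons, List.map_cons, List.foldl_cons, List.foldl_cons,
            hag d List.mem_cons_self hdx, ih hxt hag']
      · have hdx : d = x := by cases hx with | head => rfl | tail _ h => exact absurd h hxt
        subst hdx
        have hmap : t.map g' = t.map g := List.map_congr_left (fun c hc =>
          hag c (List.mem_cons_of_mem d hc) (fun h => hxt (h ▸ hc)))
        rw [List.map_cons, List.map_cons, List.foldl_cons, List.foldl_cons, hmap]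
        rw [max_comm b (g' d), pv_foldl_max_comm, max_comm b (g d), pv_foldl_max_comm]
        omega

-- on a list sorted non-decreasingly, every element is ≤ the last one
lemma pv_le_getLast (s : List Char) (hs : s.Pairwise (· ≤ ·)) (x : Char) (hx : x ∈ s)
    (d : Char) (hd : s.getLast? = some d) : x ≤ d := by
  induction s with
  | nil => cases hx
  | cons a t ih =>
      cases t with
      | nil =>
          simp at hd hx
          subst hd; subst hx; exact le_refl _
      | cons b u =>
          rw [List.getLast?_cons_cons] at hd
          cases hx with
          | head =>
              have hmem : d ∈ b :: u := List.mem_of_getLast? hd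
              exact (List.pairwise_cons.mp hs).1 d hmem
          | tail _ h => exact ih (List.pairwise_cons.mp hs).2 h hd

-- full invariant of B's sweep over a sorted list
lemma pvB_inv (s : List Char) (hs : s.Pairwise (· ≤ ·)) :
    s.foldl pvBStep (none, 0, 0) =
      (s.getLast?,
       (match s.getLast? with | none => 0 | some c => ((s.count c : Nat) : Int)),
       pvM s) := by
  induction s using List.reverseRecOn with
  | nil => rfl
  | append_singleton s x ih =>
      have hs' : s.Pairwise (· ≤ ·) := hs.sublist (List.sublist_append_left s [x])
      have hub : ∀ a ∈ s, a ≤ x := by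
        intro a ha
        have := (List.pairwise_append.mp hs).2.2
        simpa using this a ha
      rw [List.foldl_append, List.foldl_cons, List.foldl_nil, ih hs']
      have hlast : (s ++ [x]).getLast? = some x := by simp
      by_cases hsx : s.getLast? = some x
      · -- the run continues
        have hxs : x ∈ s := List.mem_of_getLast? hsx
        have hsx' : (some x = s.getLast?) = True := by simp [hsx]
        unfold pvBStep
        simp only [if_true, hsx, hlast]
        have hcnt : (s ++ [x]).count x = s.count x + 1 := by
          simp [List.count_append]
        have hM : pvM (s ++ [x]) = max (pvM s) (pvAdj x (((s.count x : Nat) : Int) + 1)) := by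
          unfold pvM
          rw [pv_dedup_app, if_pos hxs]
          have := pv_bump (PySem.List.dedup s)
            (fun c => pvAdj c ((s.count c : Nat) : Int))
            (fun c => pvAdj c (((s ++ [x]).count c : Nat) : Int)) x
            ((PySem.List.mem_dedup s x).mpr hxs)
            (by simp only [hcnt]; push_cast; exact pvAdj_mono x (by omega))
            (by
              intro c _ hcx
              have h0 : (s ++ [x]).count c = s.count c := by
                simp [List.count_append, List.count_eq_zero, hcx]
              simp only [h0])
            0
          rw [this, hcnt]
          push_cast
          rfl
        rw [hM, hcnt]
        push_cast
        rfl
      · -- a new run starts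
        have hxs : x ∉ s := by
          intro hxmem
          have hne : s ≠ [] := List.ne_nil_of_mem hxmem
          have hd : s.getLast? = some (s.getLast hne) := List.getLast?_eq_some_getLast hne
          have h1 : x ≤ s.getLast hne := pv_le_getLast s hs' x hxmem _ hd
          have h2 : s.getLast hne ≤ x := hub _ (List.getLast_mem hne)
          exact hsx (by rw [hd, le_antisymm h2 h1])
        have hsx' : ¬ (some x = s.getLast?) := fun h => hsx h.symm
        unfold pvBStep
        simp only [hlast, if_neg hsx']
        have hcnt : (s ++ [x]).count x = 1 := by
          simp [List.count_append, List.count_eq_zero.mpr hxs]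
        have hM : pvM (s ++ [x]) = max (pvM s) (pvAdj x 1) := by
          unfold pvM
          rw [pv_dedup_app, if_neg hxs, List.map_append, List.foldl_append]
          have hmap : (PySem.List.dedup s).map (fun c => pvAdj c (((s ++ [x]).count c : Nat) : Int))
              = (PySem.List.dedup s).map (fun c => pvAdj c ((s.count c : Nat) : Int)) := by
            refine List.map_congr_left (fun c hc => ?_)
            have hcx : c ≠ x := fun h => hxs (h ▸ (PySem.List.mem_dedup s c).mp hc)
            have : (s ++ [x]).count c = s.count c := by
              simp [List.count_append, List.count_eq_zero, hcx]
            rw [this]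
          rw [hmap, List.map_cons, List.map_nil, List.foldl_cons, List.foldl_nil, hcnt]
          rfl
        rw [hM, hcnt]
        push_cast
        rfl

-- counting '6' after the 9→6 relabelling pools the sixes and nines
lemma pv_count6_map (l : List Char) :
    (l.map (fun c => if c == '9' then '6' else c)).count '6' = l.count '6' + l.count '9' := by
  induction l with
  | nil => rfl
  | cons a t ih =>
      rw [List.map_cons, List.count_cons, List.count_cons, List.count_cons, ih]
      by_cases h9 : a = '9'
      · subst h9; simp; omega
      · by_cases h6 : a = '6'
        · subst h6; simp; omega
        · simp [h9, h6]

-- other characters are untouched by the relabelling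
lemma pv_count_other_map (l : List Char) (c : Char) (h6 : c ≠ '6') (h9 : c ≠ '9') :
    (l.map (fun c => if c == '9' then '6' else c)).count c = l.count c := by
  rw [List.count_eq_countP, List.countP_map, List.count_eq_countP]
  refine List.countP_congr (fun a _ => ?_)
  by_cases ha : a = '9'
  · subst ha; simp [Ne.symm h6, Ne.symm h9]
  · simp [ha]

-- membership in the relabelled list
lemma pv_mem_map6 (l : List Char) (c : Char) :
    (c ∈ l.map (fun c => if c == '9' then '6' else c)) ↔
      (c = '6' ∧ ('6' ∈ l ∨ '9' ∈ l)) ∨ (c ∈ l ∧ pvOther c = true) := by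
  simp only [List.mem_map]
  constructor
  · rintro ⟨a, ha, hfa⟩
    by_cases h9 : a = '9'
    · subst h9; simp at hfa; exact Or.inl ⟨hfa.symm, Or.inr ha⟩
    · simp [h9] at hfa
      subst hfa
      by_cases h6 : a = '6'
      · exact Or.inl ⟨h6, Or.inl (h6 ▸ ha)⟩
      · exact Or.inr ⟨ha, by simp [pvOther, h6, h9]⟩
  · rintro (⟨rfl, h | h⟩ | ⟨hc, ho⟩)
    · exact ⟨'6', h, rfl⟩
    · exact ⟨'9', h, rfl⟩
    · refine ⟨c, hc, ?_⟩
      have h9 : c ≠ '9' := by intro h; subst h; simp [pvOther] at ho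
      simp [h9]

lemma pv_nodup_dedup (xs : List Char) : (PySem.List.dedup xs).Nodup := by
  rw [PySem.List.dedup_eq_ofList]; exact PySem.Set.nodup_ofList xs

-- ===== VERDICT =====
theorem solution_spec : Claim_equal_solution := by
  unfold Claim_equal_solution
  intro array _
  unfold Spec_solution solution solution_alt
  simp only [pv_loop_eq]
  have hgetD : ∀ s : Int, (PySem.Dict.mk (('6', s) ::
      ((PySem.List.dedup array.toList).filter pvOther).map
        (fun c => (c, (array.toList.count c : Int))))).getD '6' 0 = s := by
    intro s
    simp [PySem.Dict.getD_eq_get?_getD, PySem.Dict.get?_mk_cons]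
  rw [hgetD]
  set l := array.toList with hl
  set f : Char → Char := fun c => if c == '9' then '6' else c with hf
  set n : Int := ((l.count '6' + l.count '9' : Nat) : Int) with hn
  have hn0 : 0 ≤ n := Int.natCast_nonneg _
  have h2 : (0:Int) < 2 := by norm_num
  set X : Int := (PySem.List.max?
      (((PySem.List.dedup l).filter pvOther).map (fun c => (l.count c : Int))) (fun v => v)).getD 0
    with hX
  -- B's sweep over the sorted relabelled list computes max (pvAdj '6' n) X
  have hB : (((PySem.List.sorted (l.map f) (fun c => c) false).foldl pvBStep (none, 0, 0)).2.2 : Int)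
      = max (pvAdj '6' n) X := by
    set s' := PySem.List.sorted (l.map f) (fun c => c) false with hs'
    have hpair : s'.Pairwise (· ≤ ·) := by
      have := PySem.List.sorted_pairwise (l.map f) (fun c => c)
      simpa using this
    have hperm : s'.Perm (l.map f) := PySem.List.sorted_perm _ _ _
    rw [pvB_inv s' hpair]
    -- pvM s' = pvM (l.map f)
    have hcong : (fun c => pvAdj c ((s'.count c : Nat) : Int))
        = (fun c => pvAdj c (((l.map f).count c : Nat) : Int)) :=
      funext fun c => by rw [hperm.count_eq]
    have hdperm : (PySem.List.dedup s').Perm (PySem.List.dedup (l.map f)) := by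
      rw [List.perm_ext_iff_of_nodup (pv_nodup_dedup _) (pv_nodup_dedup _)]
      intro a
      rw [PySem.List.mem_dedup, PySem.List.mem_dedup]
      exact hperm.mem_iff
    have h1 : pvM s' = pvM (l.map f) := by
      unfold pvM
      rw [hcong]
      exact List.Perm.foldl_eq (hdperm.map _) 0
    rw [h1]
    -- pvM (l.map f) = fold over the explicit key list D2
    set D2 : List Char := (if ('6' : Char) ∈ l.map f then ['6'] else [])
        ++ (PySem.List.dedup l).filter pvOther with hD2
    have hnd2 : D2.Nodup := by
      have hfnd : ((PySem.List.dedup l).filter pvOther).Nodup := (pv_nodup_dedup l).filter _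
      rw [hD2]
      split
      · simp only [List.singleton_append, List.nodup_cons]
        exact ⟨fun h => (pvF1 l '6' h).1 rfl, hfnd⟩
      · simpa using hfnd
    have hmemD2 : ∀ c, c ∈ D2 ↔ c ∈ PySem.List.dedup (l.map f) := by
      intro c
      rw [PySem.List.mem_dedup, pv_mem_map6, hD2]
      simp only [List.mem_append, List.mem_filter, PySem.List.mem_dedup]
      constructor
      · rintro (h | ⟨hc, ho⟩)
        · have hc6 : c = '6' := by
            by_contra h'
            split at h
            · simp [h'] at h
            · simp at h
          subst hc6
          split at h
          · rename_i hmem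
            rw [pv_mem_map6] at hmem
            rcases hmem with ⟨_, hor⟩ | ⟨_, ho⟩
            · exact Or.inl ⟨rfl, hor⟩
            · simp [pvOther] at ho
          · simp at h
        · exact Or.inr ⟨hc, ho⟩
      · rintro (⟨rfl, hor⟩ | ⟨hc, ho⟩)
        · refine Or.inl ?_
          have : ('6' : Char) ∈ l.map f := by
            rw [pv_mem_map6]; exact Or.inl ⟨rfl, hor⟩
          simp [this]
        · exact Or.inr ⟨hc, ho⟩
    have hDp : D2.Perm (PySem.List.dedup (l.map f)) := by
      rw [List.perm_ext_iff_of_nodup hnd2 (pv_nodup_dedup (l.map f))]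
      exact hmemD2
    have h3 : pvM (l.map f)
        = (D2.map (fun c => pvAdj c (((l.map f).count c : Nat) : Int))).foldl max 0 :=
      (List.Perm.foldl_eq (hDp.map _) 0).symm
    rw [h3]
    -- the filter part of D2 carries exactly A's "other" counts
    have hother : ((PySem.List.dedup l).filter pvOther).map
          (fun c => pvAdj c (((l.map f).count c : Nat) : Int))
        = ((PySem.List.dedup l).filter pvOther).map (fun c => ((l.count c : Nat) : Int)) := by
      refine List.map_congr_left (fun c hc => ?_)
      obtain ⟨h6, h9, _⟩ := pvF1 l c hc
      rw [pv_count_other_map l c h6 h9]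
      simp [pvAdj, h6]
    have hadj0 : (0:Int) ≤ pvAdj '6' n := by
      simp only [pvAdj, if_pos]
      rw [PySem.Int.floordiv_eq_ediv_of_pos h2]
      omega
    by_cases h66 : ('6' : Char) ∈ l.map f
    · rw [hD2]
      rw [if_pos h66, List.singleton_append, List.map_cons, List.foldl_cons, hother]
      have hc6 : (((l.map f).count '6' : Nat) : Int) = n := by
        rw [pv_count6_map]
      rw [hc6]
      show List.foldl max (max (0:Int) (pvAdj '6' n))
          (((PySem.List.dedup l).filter pvOther).map (fun c => ((l.count c : Nat) : Int)))
        = max (pvAdj '6' n) X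
      rw [pv_max_split _ _ (le_max_left 0 _), max_eq_right hadj0]
    · -- no sixes or nines at all: n = 0 and pvAdj '6' 0 = 0
      have hzero : n = 0 := by
        have : (l.map f).count '6' = 0 := List.count_eq_zero.mpr h66
        rw [pv_count6_map] at this
        omega
      rw [hD2, if_neg h66, List.nil_append, hother, hzero]
      have h00 : pvAdj '6' 0 = 0 := by decide
      rw [h00]
      show List.foldl max (0:Int)
          (((PySem.List.dedup l).filter pvOther).map (fun c => ((l.count c : Nat) : Int)))
        = max 0 X
      exact pv_max_split _ 0 le_rfl
  rw [hB]
  -- A's adjusted six value equals pvAdj '6' n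
  have hpv : pvAdj '6' n = PySem.Int.floordiv (n + 1) 2 := by simp [pvAdj]
  split_ifs with hodd
  · rw [pv_final _ _ _ (by rw [PySem.Int.floordiv_eq_ediv_of_pos h2]; omega)]
    rw [hpv]
    have he : (PySem.Int.floordiv n 2 + 1 : Int) = PySem.Int.floordiv (n + 1) 2 := by
      rw [PySem.Int.floordiv_eq_ediv_of_pos h2, PySem.Int.floordiv_eq_ediv_of_pos h2]
      rw [PySem.Int.mod_eq_emod_of_pos h2] at hodd
      omega
    rw [he]
  · rw [pv_final _ _ _ (by rw [PySem.Int.floordiv_eq_ediv_of_pos h2]; omega)]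
    rw [hpv]
    have he : (PySem.Int.floordiv n 2 : Int) = PySem.Int.floordiv (n + 1) 2 := by
      rw [PySem.Int.floordiv_eq_ediv_of_pos h2, PySem.Int.floordiv_eq_ediv_of_pos h2]
      rw [PySem.Int.mod_eq_emod_of_pos h2] at hodd
      omega
    rw [he]
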